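-- pv_equiv track=rewrite | github.com/smenon02/knotProject | helpers/traversal.py | shortest_loops
-- ===== SOURCE A (Python) =====
-- def shortest_loops(cycle_map):
--     shortest_cycles = {}
--     for node,path in cycle_map.items():
--         visited = {}
--         min_cycle = None
--         for i, current in enumerate(path):
--             if current in visited:
--                 start_idx = visited[current]
--                 cycle = path[start_idx:i + 1]
--                 if min_cycle is None or len(cycle) < len(min_cycle):
--                     min_cycle = cycle
--             visited[current] = i
--         shortest_cycles[node] = min_cycle if min_cycle else []
--     return shortest_cycles
-- ===== SOURCE B (Python) =====
-- def shortest_loops(cycle_map):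
--     result = {}
--     for node, path in cycle_map.items():
--         positions = {}
--         for i, x in enumerate(path):
--             positions.setdefault(x, []).append(i)
--         best = None
--         for occ in positions.values():
--             for s, e in zip(occ, occ[1:]):
--                 cand = (e - s + 1, e, s)
--                 if best is None or cand < best:
--                     best = cand
--         result[node] = path[best[2]:best[1] + 1] if best is not None else []
--     return result
-- ===== Notes on version B (the rewrite author's own statement) =====
-- stated objective: alternative
-- what changed: Replaces A's single pass with a last-seen dict and a running min slice by a staged algorithm: first group all occurrence positions per element into a dict of position lists, then scan consecutive occurrence pairs per element and take the global min by the (length, end, start) tuple, slicing once at the end.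
import Mathlib
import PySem

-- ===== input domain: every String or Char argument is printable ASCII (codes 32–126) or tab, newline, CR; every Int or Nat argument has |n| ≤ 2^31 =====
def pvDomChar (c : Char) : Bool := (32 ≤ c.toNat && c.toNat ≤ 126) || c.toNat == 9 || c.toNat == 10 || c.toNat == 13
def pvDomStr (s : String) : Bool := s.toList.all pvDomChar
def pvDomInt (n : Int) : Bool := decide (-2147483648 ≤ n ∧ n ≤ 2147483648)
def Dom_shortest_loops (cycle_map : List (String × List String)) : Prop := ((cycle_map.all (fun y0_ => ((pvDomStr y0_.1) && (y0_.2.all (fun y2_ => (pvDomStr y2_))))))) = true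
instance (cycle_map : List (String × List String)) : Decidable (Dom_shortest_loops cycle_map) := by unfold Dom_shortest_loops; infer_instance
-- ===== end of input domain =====

-- B replaces A's single pass (last-seen dict + running min-cycle slice) by a staged algorithm:
-- group all occurrence positions per element into a dict of position lists, then take the global
-- min over consecutive occurrence pairs by the (length, end, start) tuple and slice once.

-- ===== PORT A =====
-- inner loop body of A: state = (visited, min_cycle), one enumerate item (i, current)
def pvStepA (path : List String) (st : PySem.Dict String Int × Option (List String))
    (ic : Int × String) : PySem.Dict String Int × Option (List String) :=
  let i := ic.1
  let current := ic.2
  let min_cycle :=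
    if st.1.contains current then          -- if current in visited
      let start_idx := (st.1.get? current).getD 0   -- visited[current]; key present (guarded by the test)
      let cycle := PySem.List.slice path (some start_idx) (some (i + 1))
      match st.2 with                       -- if min_cycle is None or len(cycle) < len(min_cycle)
      | none => some cycle
      | some mc => if cycle.length < mc.length then some cycle else some mc
    else st.2
  (st.1.insert current i, min_cycle)        -- visited[current] = i

def shortest_loops (cycle_map : List (String × List String)) : List (String × List String) :=
  (cycle_map.foldl
    (fun shortest_cycles np =>
      let st := (PySem.List.enumerate np.2 0).foldl (pvStepA np.2) (PySem.Dict.empty, none)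
      shortest_cycles.insert np.1
        (match st.2 with                    -- min_cycle if min_cycle else []
         | some mc => if mc.isEmpty then [] else mc
         | none => []))
    PySem.Dict.empty).items

-- ===== PORT B =====
-- cand = (e - s + 1, e, s) for a pair (s, e) of consecutive occurrence positions
def pvCandOf (se : Int × Int) : Int × Int × Int := (se.2 - se.1 + 1, se.2, se.1)

-- Python's tuple '<' on the (length, end, start) triples: lexicographic
def pvLt3 (a b : Int × Int × Int) : Bool :=
  decide (a.1 < b.1) || (a.1 == b.1 && (decide (a.2.1 < b.2.1) || (a.2.1 == b.2.1 && decide (a.2.2 < b.2.2))))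

-- body of B's inner loop: 'if best is None or cand < best: best = cand'
def pvBestStep (b : Option (Int × Int × Int)) (se : Int × Int) : Option (Int × Int × Int) :=
  match b with
  | none => some (pvCandOf se)
  | some m => if pvLt3 (pvCandOf se) m then some (pvCandOf se) else some m

def pvLoopB (path : List String) : List String :=
  -- positions.setdefault(x, []).append(i) over enumerate(path)
  let positions := (PySem.List.enumerate path 0).foldl
    (fun d p => d.modify p.2 [] (· ++ [p.1])) PySem.Dict.empty
  -- for occ in positions.values(): for s, e in zip(occ, occ[1:]): …
  let best := positions.values.foldl
    (fun b occ => (occ.zip (PySem.List.slice occ (some 1) none)).foldl pvBestStep b) none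
  match best with                           -- path[best[2]:best[1] + 1] if best is not None else []
  | some m => PySem.List.slice path (some m.2.2) (some (m.2.1 + 1))
  | none => []

def shortest_loops_alt (cycle_map : List (String × List String)) : List (String × List String) :=
  (cycle_map.foldl (fun result np => result.insert np.1 (pvLoopB np.2)) PySem.Dict.empty).items

-- ===== PRECONDITION & SPEC =====
def Spec_shortest_loops (cycle_map : List (String × List String)) (out : List (String × List String)) : Prop := out = shortest_loops_alt cycle_map
instance (cycle_map : List (String × List String)) (out : List (String × List String)) : Decidable (Spec_shortest_loops cycle_map out) := by unfold Spec_shortest_loops; infer_instance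

-- ===== CLAIM (what is proved, stated in full; the proofs are below) =====
def Claim_equal_shortest_loops : Prop := ∀ (cycle_map : List (String × List String)), Dom_shortest_loops cycle_map → Spec_shortest_loops cycle_map (shortest_loops cycle_map)

-- ===== LEMMAS AND PROOFS =====

-- last index of x in p, as A's visited dict stores it
def pvLastIdx? (p : List String) (x : String) : Option Int :=
  match PySem.List.index? p.reverse x with
  | some k => some ((p.length : Int) - 1 - (k : Int))
  | none => none

-- the candidate list of A's consecutive-repeat pairs for end indices < n, in end order
def pvCands (path : List String) : Nat → List (Int × Int × Int)
  | 0 => []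
  | n + 1 => pvCands path n ++
      (match pvLastIdx? (path.take n) (path.getD n "") with
       | some s => [((n : Int) - s + 1, (n : Int), s)]
       | none => [])

def pvMinC (path : List String) (n : Nat) : Option (Int × Int × Int) :=
  PySem.List.min2? (pvCands path n) (fun c => c.1) (fun c => c.2.1)

def pvStateA (path : List String) (n : Nat) : PySem.Dict String Int × Option (List String) :=
  (PySem.List.enumerate (path.take n) 0).foldl (pvStepA path) (PySem.Dict.empty, none)

-- (s, e) is a pair of consecutive occurrences of the same element in path
def pvGood (path : List String) (s e : Nat) : Prop :=
  s < e ∧ e < path.length ∧ path.getD s "" = path.getD e "" ∧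
    ∀ k, s < k → k < e → path.getD k "" ≠ path.getD e ""

-- strict lex orders as Props
def pvLt3P (a b : Int × Int × Int) : Prop :=
  a.1 < b.1 ∨ (a.1 = b.1 ∧ (a.2.1 < b.2.1 ∨ (a.2.1 = b.2.1 ∧ a.2.2 < b.2.2)))
def pvLt2P (a b : Int × Int × Int) : Prop := a.1 < b.1 ∨ (a.1 = b.1 ∧ a.2.1 < b.2.1)

lemma pvStateA_succ (path : List String) (n : Nat) (hn : n < path.length) :
    pvStateA path (n + 1) = pvStepA path (pvStateA path n) ((n : Int), path[n]) := by
  unfold pvStateA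
  rw [List.take_add_one, List.getElem?_eq_getElem hn]
  simp only [Option.toList_some]
  rw [PySem.List.enumerate_append, List.foldl_append]
  simp [PySem.List.enumerate, List.length_take, Nat.min_eq_left (Nat.le_of_lt hn)]

lemma pvLastIdx?_append (p : List String) (y x : String) :
    pvLastIdx? (p ++ [y]) x = if x = y then some ((p.length : Int)) else pvLastIdx? p x := by
  unfold pvLastIdx?
  rw [List.reverse_append]
  simp only [List.reverse_singleton, List.singleton_append]
  by_cases hxy : x = y
  · subst hxy
    rw [PySem.List.index?_cons_self]
    simp
  · rw [PySem.List.index?_cons_of_ne p.reverse (Ne.symm hxy)]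
    cases h : PySem.List.index? p.reverse x with
    | none => simp [hxy]
    | some k => simp [hxy]; ring

lemma pvLastIdx?_bounds (p : List String) (x : String) (s : Int)
    (h : pvLastIdx? p x = some s) : 0 ≤ s ∧ s < (p.length : Int) := by
  unfold pvLastIdx? at h
  cases hk : PySem.List.index? p.reverse x with
  | none => rw [hk] at h; simp at h
  | some k =>
    rw [hk] at h
    simp at h
    obtain ⟨pre, suf, hps, hlen, -⟩ := (PySem.List.index?_eq_some_iff _ _ _).1 hk
    have : k < p.reverse.length := by rw [hps]; simp; omega
    rw [List.length_reverse] at this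
    have hp : 0 < p.length := by omega
    omega

lemma pvLastIdx?_isSome_iff (p : List String) (x : String) :
    (pvLastIdx? p x).isSome ↔ x ∈ p := by
  unfold pvLastIdx?
  cases hk : PySem.List.index? p.reverse x with
  | none =>
    have := (PySem.List.index?_eq_none_iff (xs := p.reverse) (v := x)).1 hk
    simp_all
  | some k =>
    have : (PySem.List.index? p.reverse x).isSome := by rw [hk]; rfl
    rw [PySem.List.index?_isSome_iff] at this
    simp_all

lemma pvMin2?_append (l : List (Int × Int × Int)) (c : Int × Int × Int) :
    PySem.List.min2? (l ++ [c]) (fun c => c.1) (fun c => c.2.1) =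
      (match PySem.List.min2? l (fun c => c.1) (fun c => c.2.1) with
       | none => some c
       | some m =>
         if (decide (c.1 < m.1) || !decide (m.1 < c.1) && decide (c.2.1 < m.2.1)) then some c else some m) := by
  unfold PySem.List.min2?
  rw [List.foldl_append]
  simp only [List.foldl_cons, List.foldl_nil]
  cases List.foldl _ none l with
  | none => rfl
  | some m => rfl

lemma pvLength_slice (xs : List String) (a b : Int) (h0 : 0 ≤ a) (hab : a ≤ b)
    (hb : b ≤ (xs.length : Int)) :
    ((PySem.List.slice xs (some a) (some b)).length : Int) = b - a := by
  rw [PySem.List.slice_of_nonneg xs h0 (le_trans h0 hab) (le_trans hab hb) hb]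
  simp [List.length_take, List.length_drop]
  omega

lemma pvCands_succ (path : List String) (n : Nat) :
    pvCands path (n + 1) = pvCands path n ++
      (match pvLastIdx? (path.take n) (path.getD n "") with
       | some s => [((n : Int) - s + 1, (n : Int), s)]
       | none => []) := rfl

lemma pvInv (path : List String) (n : Nat) (hn : n ≤ path.length) :
    (∀ x, (pvStateA path n).1.get? x = pvLastIdx? (path.take n) x)
    ∧ (pvStateA path n).2 =
        (pvMinC path n).map (fun c => PySem.List.slice path (some c.2.2) (some (c.2.1 + 1)))
    ∧ (∀ c, pvMinC path n = some c →
        0 ≤ c.2.2 ∧ c.2.2 < c.2.1 ∧ c.2.1 < (n : Int) ∧ c.1 = c.2.1 - c.2.2 + 1) := by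
  induction n with
  | zero =>
    refine ⟨fun x => ?_, ?_, fun c hc => ?_⟩
    · simp [pvStateA, pvLastIdx?]
    · simp [pvStateA, pvMinC, pvCands, PySem.List.min2?]
    · simp [pvMinC, pvCands, PySem.List.min2?] at hc
  | succ m ih =>
    have hmlt : m < path.length := hn
    have hm : m ≤ path.length := Nat.le_of_succ_le hn
    obtain ⟨ihD, ihM, ihB⟩ := ih hm
    have hEq : path.getD m "" = path[m] := by
      simp [List.getD_eq_getElem?_getD, List.getElem?_eq_getElem hmlt]
    have hlen : (path.take m).length = m := by simp [List.length_take, Nat.min_eq_left hm]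
    have hcont : (pvStateA path m).1.contains path[m] = (pvLastIdx? (path.take m) path[m]).isSome := by
      rw [PySem.Dict.contains_eq_isSome_get?, ihD]
    have htake : path.take (m + 1) = path.take m ++ [path[m]] := by
      rw [List.take_add_one, List.getElem?_eq_getElem hmlt]; rfl
    rw [pvStateA_succ path m hmlt]
    cases hL : pvLastIdx? (path.take m) path[m] with
    | none =>
      rw [hL] at hcont
      have hC : pvCands path (m + 1) = pvCands path m := by
        rw [pvCands_succ, hEq, hL, List.append_nil]
      refine ⟨fun x => ?_, ?_, fun c hc => ?_⟩
      · simp only [pvStepA, hcont, Option.isSome_none, Bool.false_eq_true, if_false]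
        rw [PySem.Dict.get?_insert, htake, pvLastIdx?_append, ihD x, hlen]
      · simp only [pvStepA, hcont, Option.isSome_none, Bool.false_eq_true, if_false]
        rw [ihM]; unfold pvMinC; rw [hC]
      · unfold pvMinC at hc; rw [hC] at hc
        have := ihB c hc
        refine ⟨this.1, this.2.1, by push_cast; omega, this.2.2.2⟩
    | some s =>
      rw [hL] at hcont
      obtain ⟨hs0, hsm⟩ := pvLastIdx?_bounds _ _ _ hL
      rw [hlen] at hsm
      have hgd : ((pvStateA path m).1.get? path[m]).getD 0 = s := by rw [ihD, hL]; rfl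
      have hC : pvCands path (m + 1) = pvCands path m ++ [((m : Int) - s + 1, (m : Int), s)] := by
        rw [pvCands_succ, hEq, hL]
      have hMC : pvMinC path (m + 1) =
          (match pvMinC path m with
           | none => some ((m : Int) - s + 1, (m : Int), s)
           | some mm =>
             if (decide (((m : Int) - s + 1) < mm.1) || !decide (mm.1 < ((m : Int) - s + 1)) && decide ((m : Int) < mm.2.1))
             then some ((m : Int) - s + 1, (m : Int), s) else some mm) := by
        unfold pvMinC; rw [hC, pvMin2?_append]
      have hcyc : ((PySem.List.slice path (some s) (some ((m : Int) + 1))).length : Int)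
          = (m : Int) + 1 - s := by
        refine pvLength_slice path s ((m : Int) + 1) hs0 (by omega) (by omega)
      cases hMm : pvMinC path m with
      | none =>
        rw [hMm] at ihM
        simp only [Option.map_none] at ihM
        refine ⟨fun x => ?_, ?_, fun c hc => ?_⟩
        · simp only [pvStepA, hcont, Option.isSome_some, if_true, ihM]
          rw [PySem.Dict.get?_insert, htake, pvLastIdx?_append, ihD x, hlen]
        · simp only [pvStepA, hcont, Option.isSome_some, if_true, ihM, hgd]
          rw [hMC, hMm]
          rfl
        · rw [hMC, hMm] at hc
          simp only [Option.some_inj] at hc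
          subst hc
          refine ⟨hs0, by push_cast at hsm ⊢; omega, by push_cast; omega, by ring⟩
      | some mm =>
        rw [hMm] at ihM
        simp only [Option.map_some] at ihM
        obtain ⟨hb0, hb1, hb2, hb3⟩ := ihB mm hMm
        have hmclen : ((PySem.List.slice path (some mm.2.2) (some (mm.2.1 + 1))).length : Int)
            = mm.1 := by
          rw [pvLength_slice path mm.2.2 (mm.2.1 + 1) hb0 (by omega) (by omega)]
          omega
        have hdec2 : decide ((m : Int) < mm.2.1) = false := by
          simp; omega
        refine ⟨fun x => ?_, ?_, fun c hc => ?_⟩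
        · simp only [pvStepA, hcont, Option.isSome_some, if_true]
          rw [PySem.Dict.get?_insert, htake, pvLastIdx?_append, ihD x, hlen]
        · simp only [pvStepA, hcont, Option.isSome_some, if_true, ihM, hgd]
          rw [hMC, hMm]
          simp only [hdec2, Bool.and_false, Bool.or_false]
          by_cases hlt : (PySem.List.slice path (some s) (some ((m : Int) + 1))).length
              < (PySem.List.slice path (some mm.2.2) (some (mm.2.1 + 1))).length
          · have hlt' : ((m : Int) - s + 1) < mm.1 := by
              have h1 : ((PySem.List.slice path (some s) (some ((m : Int) + 1))).length : Int)
                  < ((PySem.List.slice path (some mm.2.2) (some (mm.2.1 + 1))).length : Int) := by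
                exact_mod_cast hlt
              rw [hcyc, hmclen] at h1; omega
            rw [if_pos hlt, if_pos (by simpa using hlt')]
            rfl
          · have : ¬ (((m : Int) - s + 1) < mm.1) := by
              intro hcon
              apply hlt
              have h1 : ((PySem.List.slice path (some s) (some ((m : Int) + 1))).length : Int)
                  < ((PySem.List.slice path (some mm.2.2) (some (mm.2.1 + 1))).length : Int) := by
                rw [hcyc, hmclen]; omega
              exact_mod_cast h1
            rw [if_neg hlt, if_neg (by simpa using this)]
            rfl
        · rw [hMC, hMm] at hc
          simp only [hdec2, Bool.and_false, Bool.or_false] at hc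
          by_cases hlt : ((m : Int) - s + 1) < mm.1
          · rw [if_pos (by simpa using hlt)] at hc
            simp only [Option.some_inj] at hc
            subst hc
            refine ⟨hs0, by push_cast at hsm ⊢; omega, by push_cast; omega, by ring⟩
          · rw [if_neg (by simpa using hlt)] at hc
            simp only [Option.some_inj] at hc
            subst hc
            refine ⟨hb0, hb1, by push_cast at hb2 ⊢; omega, hb3⟩

-- A's inner loop result, via pvInv, as the min over pvCands
lemma pvInnerA_eq (path : List String) :
    (match ((PySem.List.enumerate path 0).foldl (pvStepA path) (PySem.Dict.empty, none)).2 with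
     | some mc => if mc.isEmpty then [] else mc
     | none => []) =
    (match pvMinC path path.length with
     | some c => PySem.List.slice path (some c.2.2) (some (c.2.1 + 1))
     | none => []) := by
  obtain ⟨-, hM, hB⟩ := pvInv path path.length le_rfl
  have h0 : ((PySem.List.enumerate path 0).foldl (pvStepA path) (PySem.Dict.empty, none))
      = pvStateA path path.length := by
    unfold pvStateA; rw [List.take_length]
  rw [h0, hM]
  cases hMm : pvMinC path path.length with
  | none => rfl
  | some c =>
    obtain ⟨h1, h2, h3, h4⟩ := hB c hMm
    have hlenc : ((PySem.List.slice path (some c.2.2) (some (c.2.1 + 1))).length : Int)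
        = c.2.1 + 1 - c.2.2 := pvLength_slice path c.2.2 (c.2.1 + 1) h1 (by omega) (by omega)
    have hne : (PySem.List.slice path (some c.2.2) (some (c.2.1 + 1))).isEmpty = false := by
      rw [List.isEmpty_eq_false_iff, ← List.length_pos_iff]
      omega
    simp [hne]

-- ---- characterisation of pvLastIdx? as the LAST occurrence ----
lemma pvLastIdx?_some (p : List String) (x : String) (z : Int)
    (h : pvLastIdx? p x = some z) :
      ∃ j : Nat, z = (j : Int) ∧ j < p.length ∧ p.getD j "" = x ∧
        ∀ k, j < k → k < p.length → p.getD k "" ≠ x := by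
  unfold pvLastIdx? at h
  cases hk : PySem.List.index? p.reverse x with
  | none => rw [hk] at h; simp at h
  | some k =>
    rw [hk] at h
    simp only [Option.some_inj] at h
    obtain ⟨hklt, hget, hprev⟩ := PySem.List.getElem_of_index?_eq_some hk
    rw [List.length_reverse] at hklt
    refine ⟨p.length - 1 - k, by omega, by omega, ?_, ?_⟩
    · rw [List.getD_eq_getElem p "" (by omega)]
      rw [List.getElem_reverse] at hget
      exact hget
    · intro k' hk1 hk2 hcon
      rw [List.getD_eq_getElem p "" hk2] at hcon
      have hi : p.length - 1 - k' < k := by omega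
      apply hprev (p.length - 1 - k') (by simpa using hi)
      rw [List.getElem_reverse]
      have : p.length - 1 - (p.length - 1 - k') = k' := by omega
      simp only [this]
      exact hcon

-- ---- uniqueness of the consecutive pair for a given end ----
lemma pvGood_unique (path : List String) (s1 s2 e : Nat)
    (h1 : pvGood path s1 e) (h2 : pvGood path s2 e) : s1 = s2 := by
  rcases Nat.lt_trichotomy s1 s2 with h | h | h
  · exact absurd h2.2.2.1 (h1.2.2.2 s2 h h2.1)
  · exact h
  · exact absurd h1.2.2.1 (h2.2.2.2 s1 h h1.1)

-- ---- membership in pvCands ----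
lemma mem_pvCands (path : List String) (n : Nat) (hn : n ≤ path.length) (c : Int × Int × Int) :
    c ∈ pvCands path n ↔
      ∃ s e : Nat, e < n ∧ pvGood path s e ∧ c = ((e : Int) - (s : Int) + 1, (e : Int), (s : Int)) := by
  induction n with
  | zero => simp [pvCands]
  | succ m ihm =>
    have hmlt : m < path.length := hn
    have hm : m ≤ path.length := Nat.le_of_succ_le hn
    rw [pvCands_succ, List.mem_append, ihm hm]
    have hlen : (path.take m).length = m := by simp [Nat.min_eq_left hm]
    have htakeD : ∀ j, j < m → (path.take m).getD j "" = path.getD j "" := by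
      intro j hj
      rw [List.getD_eq_getElem _ "" (by rw [hlen]; exact hj), List.getElem_take,
        List.getD_eq_getElem path "" (lt_of_lt_of_le hj hm)]
    cases hL : pvLastIdx? (path.take m) (path.getD m "") with
    | some z =>
      obtain ⟨j, rfl, hj, hjx, hjlast⟩ := pvLastIdx?_some _ _ _ hL
      rw [hlen] at hj
      have hgj : pvGood path j m := by
        refine ⟨hj, hmlt, by rw [← htakeD j hj]; exact hjx, ?_⟩
        intro k hk1 hk2 hcon
        exact hjlast k hk1 (by omega) (by rw [htakeD k hk2]; exact hcon)
      constructor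
      · rintro (⟨s, e, he, hg, rfl⟩ | hc)
        · exact ⟨s, e, Nat.lt_succ_of_lt he, hg, rfl⟩
        · simp only [List.mem_singleton] at hc
          exact ⟨j, m, Nat.lt_succ_self m, hgj, hc⟩
      · rintro ⟨s, e, he, hg, rfl⟩
        rcases Nat.lt_succ_iff_lt_or_eq.1 he with he' | rfl
        · exact Or.inl ⟨s, e, he', hg, rfl⟩
        · have : s = j := pvGood_unique path s j e hg hgj
          subst this
          exact Or.inr (by simp)
    | none =>
      have hnogood : ∀ s, ¬ pvGood path s m := by
        rintro s ⟨hs1, -, hs3, -⟩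
        have hxmem : path.getD m "" ∈ path.take m := by
          rw [← htakeD s hs1] at hs3
          rw [List.getD_eq_getElem _ "" (by rw [hlen]; exact hs1)] at hs3
          exact hs3 ▸ List.getElem_mem _
        have := (pvLastIdx?_isSome_iff (path.take m) (path.getD m "")).2 hxmem
        rw [hL] at this
        simp at this
      constructor
      · rintro (⟨s, e, he, hg, rfl⟩ | hc)
        · exact ⟨s, e, Nat.lt_succ_of_lt he, hg, rfl⟩
        · simp at hc
      · rintro ⟨s, e, he, hg, rfl⟩
        rcases Nat.lt_succ_iff_lt_or_eq.1 he with he' | rfl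
        · exact Or.inl ⟨s, e, he', hg, rfl⟩
        · exact absurd hg (hnogood s)

-- ---- B side: the occurrence table ----
def pvOcc (path : List String) (x : String) : List Int :=
  ((((PySem.List.enumerate path 0).map (fun p => (p.2, p.1))).filter (fun p => p.1 == x)).map (·.2))

lemma pvValues_eq (path : List String) :
    ((PySem.List.enumerate path 0).foldl
      (fun d p => d.modify p.2 [] (· ++ [p.1])) PySem.Dict.empty).values
    = (PySem.Set.ofList path).map (pvOcc path) := by
  have hkeys : ((PySem.List.enumerate path 0).foldl
      (fun d p => d.modify p.2 [] (· ++ [p.1])) PySem.Dict.empty).keys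
      = PySem.Set.ofList path := by
    rw [PySem.Dict.keys_foldl_modify_key, PySem.Dict.keys_empty,
        PySem.List.map_snd_enumerate, PySem.Set.update_nil_left]
  rw [PySem.Dict.values_eq_map_keys _
      (by rw [hkeys]; exact PySem.Set.nodup_ofList path) ([] : List Int), hkeys]
  refine List.map_congr_left (fun x hx => ?_)
  have hG : (PySem.List.enumerate path 0).foldl
        (fun d p => d.modify p.2 [] (· ++ [p.1])) PySem.Dict.empty
      = ((PySem.List.enumerate path 0).map (fun p => (p.2, p.1))).foldl
        (fun d q => d.modify q.1 [] (· ++ [q.2])) PySem.Dict.empty := by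
    rw [List.foldl_map]
  rw [hG, PySem.Dict.getD_foldl_modify_append, PySem.Dict.getD_empty]
  simp [pvOcc]

lemma mem_pvOcc (path : List String) (x : String) (z : Int) :
    z ∈ pvOcc path x ↔ ∃ i : Nat, i < path.length ∧ path.getD i "" = x ∧ z = (i : Int) := by
  unfold pvOcc
  rw [List.mem_map]
  constructor
  · rintro ⟨q, hq, rfl⟩
    rw [List.mem_filter] at hq
    obtain ⟨hqm, hqx⟩ := hq
    rw [List.mem_map] at hqm
    obtain ⟨p, hp, rfl⟩ := hqm
    obtain ⟨k, hk, rfl⟩ := (PySem.List.mem_enumerate_iff _ _ _).1 hp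
    refine ⟨k, hk, ?_, by simp⟩
    rw [List.getD_eq_getElem path "" hk]
    exact beq_iff_eq.1 hqx
  · rintro ⟨i, hi, hx, rfl⟩
    rw [List.getD_eq_getElem path "" hi] at hx
    refine ⟨(path[i], ((0 : Int) + i)), ?_, by simp⟩
    rw [List.mem_filter]
    refine ⟨List.mem_map.2 ⟨((0 : Int) + i, path[i]), ?_, rfl⟩, by simpa using hx⟩
    exact (PySem.List.mem_enumerate_iff _ _ _).2 ⟨i, hi, rfl⟩

lemma pvOcc_sorted (path : List String) (x : String) : (pvOcc path x).Pairwise (· < ·) := by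
  unfold pvOcc
  rw [List.pairwise_map]
  refine List.Pairwise.filter _ ?_
  rw [List.pairwise_map]
  exact PySem.List.pairwise_lt_enumerate path 0

-- adjacent pairs of a strictly sorted list = pairs with nothing in between
lemma pvZipTail_mem (l : List Int) (h : l.Pairwise (· < ·)) (a b : Int) :
    (a, b) ∈ l.zip l.tail ↔ a ∈ l ∧ b ∈ l ∧ a < b ∧ ∀ m ∈ l, ¬(a < m ∧ m < b) := by
  induction l with
  | nil => simp
  | cons x l' ih =>
    cases l' with
    | nil =>
      simp only [List.tail_cons, List.zip_nil_right, List.mem_nil_iff, List.mem_singleton,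
        false_iff]
      rintro ⟨rfl, rfl, hab, -⟩
      omega
    | cons y t =>
      obtain ⟨hx_all, hp⟩ := List.pairwise_cons.1 h
      have hxy : x < y := hx_all y List.mem_cons_self
      have hyt : ∀ m ∈ t, y < m := (List.pairwise_cons.1 hp).1
      rw [List.tail_cons, List.zip_cons_cons]
      constructor
      · intro hmem
        rcases List.mem_cons.1 hmem with heq | hmem'
        · simp only [Prod.mk.injEq] at heq
          obtain ⟨rfl, rfl⟩ := heq
          refine ⟨List.mem_cons_self, List.mem_cons_of_mem _ List.mem_cons_self, hxy, ?_⟩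
          intro m hm
          rcases List.mem_cons.1 hm with rfl | hm'
          · omega
          · rcases List.mem_cons.1 hm' with rfl | hm''
            · omega
            · have := hyt m hm''
              omega
        · have hmem'' : (a, b) ∈ (y :: t).zip (y :: t).tail := by simpa using hmem'
          obtain ⟨ha, hb, hab, hbet⟩ := (ih hp).1 hmem''
          refine ⟨List.mem_cons_of_mem _ ha, List.mem_cons_of_mem _ hb, hab, ?_⟩
          intro m hm
          rcases List.mem_cons.1 hm with rfl | hm'
          · have := hx_all a ha
            omega
          · exact hbet m hm'
      · rintro ⟨ha, hb, hab, hbet⟩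
        rcases List.mem_cons.1 ha with rfl | ha'
        · rcases List.mem_cons.1 hb with rfl | hb'
          · omega
          · rcases List.mem_cons.1 hb' with rfl | hb''
            · exact List.mem_cons_self
            · have h1 : a < y := hxy
              have h2 : y < b := hyt b hb''
              exact absurd ⟨h1, h2⟩ (hbet y (List.mem_cons_of_mem _ List.mem_cons_self))
        · have hbne : b ∈ y :: t := by
            rcases List.mem_cons.1 hb with rfl | hb'
            · have := hx_all a ha'
              omega
            · exact hb'
          have : (a, b) ∈ (y :: t).zip (y :: t).tail :=
            (ih hp).2 ⟨ha', hbne, hab, fun m hm => hbet m (List.mem_cons_of_mem _ hm)⟩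
          exact List.mem_cons_of_mem _ (by simpa using this)

-- B's flattened candidate pair list
def pvListB (path : List String) : List (Int × Int) :=
  ((PySem.Set.ofList path).map (pvOcc path)).flatMap (fun occ => occ.zip occ.tail)

lemma mem_pvListB (path : List String) (se : Int × Int) :
    se ∈ pvListB path ↔ ∃ s e : Nat, pvGood path s e ∧ se = ((s : Int), (e : Int)) := by
  unfold pvListB
  rw [List.mem_flatMap]
  obtain ⟨a, b⟩ := se
  constructor
  · rintro ⟨occ, hocc, hab⟩
    rw [List.mem_map] at hocc
    obtain ⟨x, hx, rfl⟩ := hocc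
    obtain ⟨ha, hb, hlt, hbet⟩ := (pvZipTail_mem _ (pvOcc_sorted path x) a b).1 hab
    obtain ⟨s, hs, hsx, rfl⟩ := (mem_pvOcc path x a).1 ha
    obtain ⟨e, he, hex, rfl⟩ := (mem_pvOcc path x b).1 hb
    refine ⟨s, e, ⟨by exact_mod_cast hlt, he, by rw [hsx, hex], ?_⟩, rfl⟩
    intro k hk1 hk2 hcon
    have hkx : path.getD k "" = x := by rw [hcon, hex]
    have hkmem : ((k : Int)) ∈ pvOcc path x :=
      (mem_pvOcc path x _).2 ⟨k, lt_trans hk2 he, hkx, rfl⟩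
    exact hbet _ hkmem ⟨by exact_mod_cast hk1, by exact_mod_cast hk2⟩
  · rintro ⟨s, e, ⟨hse, he, hx, hlast⟩, heq⟩
    simp only [Prod.mk.injEq] at heq
    obtain ⟨rfl, rfl⟩ := heq
    have hxmem : path.getD e "" ∈ path := by
      rw [List.getD_eq_getElem path "" he]
      exact List.getElem_mem he
    refine ⟨pvOcc path (path.getD e ""),
      List.mem_map.2 ⟨path.getD e "", (PySem.Set.mem_ofList _ _).2 hxmem, rfl⟩, ?_⟩
    apply (pvZipTail_mem _ (pvOcc_sorted path _) _ _).2
    refine ⟨(mem_pvOcc _ _ _).2 ⟨s, lt_trans hse he, hx, rfl⟩,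
      (mem_pvOcc _ _ _).2 ⟨e, he, rfl, rfl⟩, by exact_mod_cast hse, ?_⟩
    rintro m hm ⟨h1, h2⟩
    obtain ⟨k, hk, hkx, rfl⟩ := (mem_pvOcc _ _ _).1 hm
    exact hlast k (by exact_mod_cast h1) (by exact_mod_cast h2) hkx

-- ---- order facts ----
lemma pvLt3_eq_true_iff (a b : Int × Int × Int) : pvLt3 a b = true ↔ pvLt3P a b := by
  obtain ⟨a1, a2, a3⟩ := a; obtain ⟨b1, b2, b3⟩ := b
  simp [pvLt3, pvLt3P]

lemma pvLt3P_trans (a b c : Int × Int × Int) : pvLt3P a b → pvLt3P b c → pvLt3P a c := by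
  obtain ⟨a1, a2, a3⟩ := a; obtain ⟨b1, b2, b3⟩ := b; obtain ⟨c1, c2, c3⟩ := c
  simp [pvLt3P]; omega

lemma pvLt3P_negtrans (a b c : Int × Int × Int) : ¬ pvLt3P a b → ¬ pvLt3P b c → ¬ pvLt3P a c := by
  obtain ⟨a1, a2, a3⟩ := a; obtain ⟨b1, b2, b3⟩ := b; obtain ⟨c1, c2, c3⟩ := c
  simp [pvLt3P]; omega

lemma pvLt3P_irrefl (a : Int × Int × Int) : ¬ pvLt3P a a := by
  obtain ⟨a1, a2, a3⟩ := a
  simp [pvLt3P]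

lemma pvLt2P_trans (a b c : Int × Int × Int) : pvLt2P a b → pvLt2P b c → pvLt2P a c := by
  obtain ⟨a1, a2, a3⟩ := a; obtain ⟨b1, b2, b3⟩ := b; obtain ⟨c1, c2, c3⟩ := c
  simp [pvLt2P]; omega

lemma pvKeyEq_of_not (m m' : Int × Int × Int) (h3 : ¬ pvLt3P m m') (h2 : ¬ pvLt2P m' m) :
    m.1 = m'.1 ∧ m.2.1 = m'.2.1 := by
  obtain ⟨a1, a2, a3⟩ := m; obtain ⟨b1, b2, b3⟩ := m'
  simp [pvLt3P, pvLt2P] at h3 h2 ⊢; omega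

-- ---- characterisation of B's min fold ----
lemma pvBestStep_isSome (b : Option (Int × Int × Int)) (se : Int × Int) :
    (pvBestStep b se).isSome := by
  cases b with
  | none => rfl
  | some m => simp only [pvBestStep]; split <;> rfl

lemma pvBestFold_eq_none (l : List (Int × Int)) (b0 : Option (Int × Int × Int)) :
    l.foldl pvBestStep b0 = none ↔ b0 = none ∧ l = [] := by
  induction l generalizing b0 with
  | nil => simp
  | cons se t ih =>
    simp only [List.foldl_cons, ih]
    constructor
    · rintro ⟨h1, -⟩
      have := pvBestStep_isSome b0 se
      rw [h1] at this; simp at this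
    · rintro ⟨-, h⟩; simp at h

lemma pvBestFold_char (l : List (Int × Int)) :
    ∀ b0 m, l.foldl pvBestStep b0 = some m →
      (b0 = some m ∨ ∃ se ∈ l, m = pvCandOf se) ∧
      (∀ se ∈ l, ¬ pvLt3P (pvCandOf se) m) ∧
      (∀ m0, b0 = some m0 → ¬ pvLt3P m0 m) := by
  induction l with
  | nil =>
    intro b0 m h
    simp only [List.foldl_nil] at h
    refine ⟨Or.inl h, by simp, ?_⟩
    intro m0 h0
    rw [h0] at h
    rw [Option.some_inj] at h
    subst h
    exact pvLt3P_irrefl m0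
  | cons se t ih =>
    intro b0 m h
    simp only [List.foldl_cons] at h
    obtain ⟨ih1, ih2, ih3⟩ := ih (pvBestStep b0 se) m h
    have hcand : ¬ pvLt3P (pvCandOf se) m := by
      cases b0 with
      | none =>
        exact ih3 (pvCandOf se) rfl
      | some m0 =>
        by_cases hlt : pvLt3 (pvCandOf se) m0
        · exact ih3 (pvCandOf se) (by simp [pvBestStep, hlt])
        · have h1 : ¬ pvLt3P (pvCandOf se) m0 := fun hc =>
            hlt ((pvLt3_eq_true_iff _ _).2 hc)
          have h2 : ¬ pvLt3P m0 m := ih3 m0 (by simp [pvBestStep, hlt])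
          exact pvLt3P_negtrans _ _ _ h1 h2
    refine ⟨?_, ?_, ?_⟩
    · rcases ih1 with h1 | ⟨se', hse', rfl⟩
      · cases b0 with
        | none =>
          exact Or.inr ⟨se, List.mem_cons_self, by
            simpa [pvBestStep] using h1.symm⟩
        | some m0 =>
          simp only [pvBestStep] at h1
          split at h1
          · exact Or.inr ⟨se, List.mem_cons_self, by simpa using h1.symm⟩
          · exact Or.inl (by simpa using h1)
      · exact Or.inr ⟨se', List.mem_cons_of_mem _ hse', rfl⟩
    · intro se' hse'
      rcases List.mem_cons.1 hse' with rfl | hse'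
      · exact hcand
      · exact ih2 se' hse'
    · intro m0 h0
      subst h0
      simp only [pvBestStep] at h
      by_cases hlt : pvLt3 (pvCandOf se) m0
      · have hc3 : pvLt3P (pvCandOf se) m0 := (pvLt3_eq_true_iff _ _).1 hlt
        intro hm0
        exact hcand (pvLt3P_trans _ _ _ hc3 hm0)
      · exact ih3 m0 (by simp [pvBestStep, hlt])

-- ---- characterisation of min2? (A's min) ----
lemma pvMin2?_eq_none (l : List (Int × Int × Int)) :
    PySem.List.min2? l (fun c => c.1) (fun c => c.2.1) = none ↔ l = [] := by
  induction l using List.reverseRecOn with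
  | nil => simp [PySem.List.min2?]
  | append_singleton t c ih =>
    rw [pvMin2?_append]
    constructor
    · intro h
      cases hm : PySem.List.min2? t (fun c => c.1) (fun c => c.2.1) with
      | none => rw [hm] at h; simp at h
      | some m => rw [hm] at h; simp at h; split at h <;> simp_all
    · intro h; simp at h

lemma pvLt2_cond_iff (c m : Int × Int × Int) :
    (decide (c.1 < m.1) || !decide (m.1 < c.1) && decide (c.2.1 < m.2.1)) = true ↔ pvLt2P c m := by
  obtain ⟨a1, a2, a3⟩ := c; obtain ⟨b1, b2, b3⟩ := m
  simp [pvLt2P]; omega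

lemma pvMin2?_char (l : List (Int × Int × Int)) (m : Int × Int × Int)
    (h : PySem.List.min2? l (fun c => c.1) (fun c => c.2.1) = some m) :
    m ∈ l ∧ ∀ c ∈ l, ¬ pvLt2P c m := by
  induction l using List.reverseRecOn generalizing m with
  | nil => simp [PySem.List.min2?] at h
  | append_singleton t c ih =>
    rw [pvMin2?_append] at h
    cases hm : PySem.List.min2? t (fun c => c.1) (fun c => c.2.1) with
    | none =>
      rw [hm] at h
      simp only [Option.some_inj] at h
      have ht : t = [] := (pvMin2?_eq_none t).1 hm
      subst ht
      refine ⟨by rw [← h]; simp, ?_⟩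
      intro c' hc'
      simp at hc'
      rw [hc', ← h]
      obtain ⟨a1, a2, a3⟩ := c
      simp [pvLt2P]
    | some mm =>
      rw [hm] at h
      obtain ⟨hmem, hmin⟩ := ih mm hm
      simp only at h
      by_cases hcond : (decide (c.1 < mm.1) || !decide (mm.1 < c.1) && decide (c.2.1 < mm.2.1)) = true
      · rw [if_pos hcond] at h
        simp only [Option.some_inj] at h
        have hcmm : pvLt2P m mm := h ▸ (pvLt2_cond_iff _ _).1 hcond
        refine ⟨List.mem_append_right _ (by rw [← h]; simp), ?_⟩
        intro c' hc'
        rcases List.mem_append.1 hc' with hc' | hc'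
        · intro hlt
          exact hmin c' hc' (pvLt2P_trans _ _ _ hlt hcmm)
        · simp at hc'
          rw [hc', ← h]
          obtain ⟨a1, a2, a3⟩ := c
          simp [pvLt2P]
      · rw [if_neg hcond] at h
        simp only [Option.some_inj] at h
        refine ⟨List.mem_append_left _ (h ▸ hmem), ?_⟩
        intro c' hc'
        rcases List.mem_append.1 hc' with hc' | hc'
        · exact h ▸ hmin c' hc'
        · simp at hc'
          rw [hc']
          intro hlt
          exact hcond ((pvLt2_cond_iff _ _).2 (h ▸ hlt))

-- ---- B's inner loop = the min over pvCands ----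
lemma pvInnerB_eq (path : List String) :
    pvLoopB path =
    (match pvMinC path path.length with
     | some c => PySem.List.slice path (some c.2.2) (some (c.2.1 + 1))
     | none => []) := by
  have hfun : (fun (b : Option (Int × Int × Int)) (occ : List Int) =>
        (occ.zip (PySem.List.slice occ (some 1) none)).foldl pvBestStep b)
      = (fun b occ => (occ.zip occ.tail).foldl pvBestStep b) := by
    funext b occ
    rw [PySem.List.slice_from_one]
  have hv : (((PySem.List.enumerate path 0).foldl
        (fun d p => d.modify p.2 [] (· ++ [p.1])) PySem.Dict.empty).values).foldl
        (fun b occ => (occ.zip (PySem.List.slice occ (some 1) none)).foldl pvBestStep b) none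
      = (pvListB path).foldl pvBestStep none := by
    rw [pvValues_eq, hfun]
    unfold pvListB
    rw [List.foldl_flatMap]
  show (match (((PySem.List.enumerate path 0).foldl
        (fun d p => d.modify p.2 [] (· ++ [p.1])) PySem.Dict.empty).values).foldl
        (fun b occ => (occ.zip (PySem.List.slice occ (some 1) none)).foldl pvBestStep b) none with
      | some m => PySem.List.slice path (some m.2.2) (some (m.2.1 + 1))
      | none => []) = _
  rw [hv]
  cases hM : pvMinC path path.length with
  | none =>
    have hc : pvCands path path.length = [] := (pvMin2?_eq_none _).1 hM
    have hlb : pvListB path = [] := by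
      rw [List.eq_nil_iff_forall_not_mem]
      intro se hse
      obtain ⟨s, e, hg, rfl⟩ := (mem_pvListB path se).1 hse
      have : ((e : Int) - (s : Int) + 1, (e : Int), (s : Int)) ∈ pvCands path path.length :=
        (mem_pvCands path _ le_rfl _).2 ⟨s, e, hg.2.1, hg, rfl⟩
      rw [hc] at this
      simp at this
    rw [hlb]
    rfl
  | some m =>
    obtain ⟨hmem, hmin⟩ := pvMin2?_char _ _ hM
    obtain ⟨s, e, he, hg, rfl⟩ := (mem_pvCands path _ le_rfl _).1 hmem
    have hne : ((s : Int), (e : Int)) ∈ pvListB path := (mem_pvListB path _).2 ⟨s, e, hg, rfl⟩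
    cases hB : (pvListB path).foldl pvBestStep none with
    | none =>
      have := ((pvBestFold_eq_none _ _).1 hB).2
      rw [this] at hne
      simp at hne
    | some m' =>
      obtain ⟨h1, h2, h3⟩ := pvBestFold_char _ none m' hB
      rcases h1 with h1 | ⟨se', hse', rfl⟩
      · simp at h1
      obtain ⟨s', e', hg', rfl⟩ := (mem_pvListB path se').1 hse'
      have hAofB : ¬ pvLt2P (pvCandOf ((s' : Int), (e' : Int)))
          ((e : Int) - (s : Int) + 1, (e : Int), (s : Int)) :=
        hmin _ ((mem_pvCands path _ le_rfl _).2 ⟨s', e', hg'.2.1, hg', by simp [pvCandOf]⟩)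
      have hBofA : ¬ pvLt3P ((e : Int) - (s : Int) + 1, (e : Int), (s : Int))
          (pvCandOf ((s' : Int), (e' : Int))) := by
        have := h2 _ hne
        simpa [pvCandOf] using this
      obtain ⟨-, hkey2⟩ := pvKeyEq_of_not _ _ hBofA hAofB
      simp only [pvCandOf] at hkey2
      have hee : e = e' := by exact_mod_cast hkey2
      subst hee
      have hss : s = s' := pvGood_unique path s s' e hg hg'
      subst hss
      simp [pvCandOf]

-- ===== VERDICT (by name: the statement is the Claim_ definition above) =====
theorem shortest_loops_spec : Claim_equal_shortest_loops := by
  intro cycle_map _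
  unfold Spec_shortest_loops shortest_loops shortest_loops_alt
  have h : (fun (shortest_cycles : PySem.Dict String (List String)) (np : String × List String) =>
      shortest_cycles.insert np.1
        (match ((PySem.List.enumerate np.2 0).foldl (pvStepA np.2) (PySem.Dict.empty, none)).2 with
         | some mc => if mc.isEmpty then [] else mc
         | none => []))
      = (fun (result : PySem.Dict String (List String)) (np : String × List String) =>
          result.insert np.1 (pvLoopB np.2)) := by
    funext sc np
    rw [pvInnerA_eq np.2, ← pvInnerB_eq np.2]
  simp only [h]
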